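-- pv_equiv track=rewrite | github.com/TimAnderson2024/advent-of-code | 2025/P1 - Secret Entrance/solution.py | part_one
-- ===== SOURCE A (Python) =====
-- def part_one(instructions):
--     cur_pos = 50
--     num_zero = 0
--
--     for dir, dist in instructions:
--         if dir == "L":
--             cur_pos = (cur_pos - dist) % 100
--         else:
--             cur_pos = (cur_pos + dist) % 100
--
--         if cur_pos == 0:
--             num_zero += 1
--
--     return num_zero
-- ===== SOURCE B (Python) =====
-- def part_one(instructions):
--     # Map each instruction to a signed delta, build the prefix-sum table,
--     # then count the running totals at which the position (50 + t) mod 100 is zero.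
--     deltas = [-dist if dir == "L" else dist for dir, dist in instructions]
--     totals = []
--     t = 0
--     for d in deltas:
--         t += d
--         totals.append(t)
--     return sum(1 for t in totals if (50 + t) % 100 == 0)
-- ===== Notes on version B (the rewrite author's own statement) =====
-- stated objective: alternative
-- what changed: The one-pass stateful mod-100 position tracking is replaced by a three-stage pipeline: map instructions to signed deltas, build the prefix-sum table (no per-step mod), then count totals t with (50+t) % 100 == 0.
import Mathlib
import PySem

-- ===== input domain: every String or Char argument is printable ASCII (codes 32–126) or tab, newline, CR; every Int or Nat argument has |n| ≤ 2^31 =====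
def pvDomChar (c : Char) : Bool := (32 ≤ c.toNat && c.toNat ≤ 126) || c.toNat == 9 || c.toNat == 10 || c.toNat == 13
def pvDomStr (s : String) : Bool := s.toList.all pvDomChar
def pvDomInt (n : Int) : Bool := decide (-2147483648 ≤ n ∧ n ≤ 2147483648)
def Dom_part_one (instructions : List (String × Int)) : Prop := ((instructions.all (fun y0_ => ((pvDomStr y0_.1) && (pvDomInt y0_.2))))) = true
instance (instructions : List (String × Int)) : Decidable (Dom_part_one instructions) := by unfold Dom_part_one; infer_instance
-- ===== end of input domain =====

-- B replaces A's one-pass stateful mod-100 tracking by mapping to signed deltas,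
-- building the prefix-sum table, then counting totals t with (50+t) % 100 == 0 (alternative decomposition).


-- ===== PORT A =====
def part_one (instructions : List (String × Int)) : Int :=
  let st := instructions.foldl (fun (st : Int × Int) ins =>
    let cur_pos := if ins.1 == "L" then PySem.Int.mod (st.1 - ins.2) 100
                   else PySem.Int.mod (st.1 + ins.2) 100
    (cur_pos, if cur_pos == 0 then st.2 + 1 else st.2)) (50, 0)
  st.2

-- ===== PORT B =====
def part_one_alt (instructions : List (String × Int)) : Int :=
  let deltas := instructions.map (fun ins => if ins.1 == "L" then -ins.2 else ins.2)
  let totals := (deltas.foldl (fun (acc : List Int × Int) d =>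
    (acc.1 ++ [acc.2 + d], acc.2 + d)) ([], 0)).1
  ((totals.filter (fun t => PySem.Int.mod (50 + t) 100 == 0)).length : Int)

-- ===== PRECONDITION & SPEC =====
def Spec_part_one (instructions : List (String × Int)) (out : Int) : Prop := out = part_one_alt instructions
instance (instructions : List (String × Int)) (out : Int) : Decidable (Spec_part_one instructions out) := by unfold Spec_part_one; infer_instance

-- ===== CLAIM (what is proved, stated in full; the proofs are below) =====
def Claim_equal_part_one : Prop := ∀ (instructions : List (String × Int)), Dom_part_one instructions → Spec_part_one instructions (part_one instructions)

-- ===== LEMMAS AND PROOFS =====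

-- the sequence of running totals of ds starting from s
def pvPrefixes : List Int → Int → List Int
  | [], _ => []
  | d :: ds, s => (s + d) :: pvPrefixes ds (s + d)

theorem pv_mod_add (a b : Int) : PySem.Int.mod (PySem.Int.mod a 100 + b) 100 = PySem.Int.mod (a + b) 100 := by
  rw [PySem.Int.mod_eq_emod_of_pos (by norm_num), PySem.Int.mod_eq_emod_of_pos (by norm_num),
      PySem.Int.mod_eq_emod_of_pos (by norm_num)]
  omega

theorem pvB_fold (ds : List Int) (acc : List Int) (s : Int) :
    (ds.foldl (fun (acc : List Int × Int) d => (acc.1 ++ [acc.2 + d], acc.2 + d)) (acc, s)).1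
      = acc ++ pvPrefixes ds s := by
  induction ds generalizing acc s with
  | nil => simp [pvPrefixes]
  | cons d ds ih => simp [List.foldl, pvPrefixes, ih, List.append_assoc]

theorem pvA_fold (l : List (String × Int)) (s n : Int) :
    (l.foldl (fun (st : Int × Int) ins =>
      let cur_pos := if ins.1 == "L" then PySem.Int.mod (st.1 - ins.2) 100
                     else PySem.Int.mod (st.1 + ins.2) 100
      (cur_pos, if cur_pos == 0 then st.2 + 1 else st.2)) (PySem.Int.mod (50 + s) 100, n)).2
    = n + (((pvPrefixes (l.map (fun ins => if ins.1 == "L" then -ins.2 else ins.2)) s).filter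
        (fun t => PySem.Int.mod (50 + t) 100 == 0)).length : Int) := by
  induction l generalizing s n with
  | nil => simp [pvPrefixes]
  | cons hd tl ih =>
    obtain ⟨dir, dist⟩ := hd
    have key : ∀ d : Int,
        (tl.foldl (fun (st : Int × Int) ins =>
          let cur_pos := if ins.1 == "L" then PySem.Int.mod (st.1 - ins.2) 100
                         else PySem.Int.mod (st.1 + ins.2) 100
          (cur_pos, if cur_pos == 0 then st.2 + 1 else st.2))
          (PySem.Int.mod (50 + (s + d)) 100,
           if (PySem.Int.mod (50 + (s + d)) 100 == 0) then n + 1 else n)).2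
        = n + ((((s + d) :: pvPrefixes (tl.map (fun ins => if ins.1 == "L" then -ins.2 else ins.2)) (s + d)).filter
            (fun t => PySem.Int.mod (50 + t) 100 == 0)).length : Int) := by
      intro d
      rw [ih (s + d) _, List.filter_cons]
      by_cases hz : (100 : Int) ∣ 50 + s + d <;>
        simp [hz, show (50 : Int) + (s + d) = 50 + s + d from by ring] <;> omega
    by_cases hL : (dir == "L") = true
    · have h1 : PySem.Int.mod (PySem.Int.mod (50 + s) 100 - dist) 100
          = PySem.Int.mod (50 + (s + -dist)) 100 := by
        rw [sub_eq_add_neg, pv_mod_add, show (50 : Int) + s + -dist = 50 + (s + -dist) from by ring]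
      simp only [List.foldl, List.map, pvPrefixes, hL, if_true, h1]
      exact key (-dist)
    · have h1 : PySem.Int.mod (PySem.Int.mod (50 + s) 100 + dist) 100
          = PySem.Int.mod (50 + (s + dist)) 100 := by
        rw [pv_mod_add, show (50 : Int) + s + dist = 50 + (s + dist) from by ring]
      simp only [List.foldl, List.map, pvPrefixes, hL, h1]
      exact key dist

theorem part_one_eq (l : List (String × Int)) : part_one l = part_one_alt l := by
  have hB := pvB_fold (l.map (fun ins => if ins.1 == "L" then -ins.2 else ins.2)) [] 0
  unfold part_one part_one_alt
  simp only [hB, List.nil_append]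
  rw [show ((50 : Int), (0 : Int)) = (PySem.Int.mod (50 + 0) 100, (0 : Int)) from by decide,
      pvA_fold l 0 0]
  ring

-- ===== VERDICT (by name: the statement is the Claim_ definition above) =====
theorem part_one_spec : Claim_equal_part_one := by
  intro l _
  exact part_one_eq l
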